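-- pv_equiv track=rewrite | github.com/ElderMedic/FAIRiAgent | fairifier/services/mem0_service.py | _sanitize_collection_token
-- ===== SOURCE A (Python) =====
-- from typing import List, Dict, Any, Optional
--
-- def _sanitize_collection_token(
--     value: Optional[str],
--     fallback: str,
--     max_length: int = 18,
-- ) -> str:
--     raw = (value or "").strip().lower()
--     token = "".join(
--         ch if ch.isalnum() else "-"
--         for ch in raw
--     ).strip("-")
--     while "--" in token:
--         token = token.replace("--", "-")
--     token = token[:max_length].strip("-")
--     return token or fallback
-- ===== SOURCE B (Python) =====
-- from typing import Optional
--
-- def _sanitize_collection_token(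
--     value: Optional[str],
--     fallback: str,
--     max_length: int = 18,
-- ) -> str:
--     raw = (value or "").strip().lower()
--     words = []
--     cur = []
--     for ch in raw:
--         if ch.isalnum():
--             cur.append(ch)
--         else:
--             if cur:
--                 words.append("".join(cur))
--                 cur = []
--     if cur:
--         words.append("".join(cur))
--     token = "-".join(words)[:max_length].strip("-")
--     return token or fallback
-- ===== Notes on version B (the rewrite author's own statement) =====
-- stated objective: idiomatic
-- what changed: B tokenizes the lowered string into maximal alphanumeric runs in one scan and joins them with single dashes, instead of A's char-replace into a dash-padded string followed by a strip and a repeated replace('--','-') loop to collapse dash runs.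
import Mathlib
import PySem

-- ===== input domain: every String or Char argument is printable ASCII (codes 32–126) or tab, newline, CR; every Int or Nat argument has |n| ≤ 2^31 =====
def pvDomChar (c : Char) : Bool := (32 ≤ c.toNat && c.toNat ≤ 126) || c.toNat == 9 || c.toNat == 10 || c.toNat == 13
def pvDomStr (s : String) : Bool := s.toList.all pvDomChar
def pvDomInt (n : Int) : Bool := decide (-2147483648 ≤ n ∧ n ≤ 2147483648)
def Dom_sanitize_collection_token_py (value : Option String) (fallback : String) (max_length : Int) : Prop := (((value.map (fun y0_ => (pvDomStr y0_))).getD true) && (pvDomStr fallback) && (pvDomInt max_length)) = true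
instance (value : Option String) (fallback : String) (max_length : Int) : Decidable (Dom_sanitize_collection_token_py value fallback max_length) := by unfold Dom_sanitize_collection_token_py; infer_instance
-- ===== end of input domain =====

-- B replaces A's char-replace + strip + repeated replace("--","-") collapse loop by a single
-- scan collecting maximal alphanumeric runs joined with "-"; return values are proved equal.

-- ===== PORT A =====
-- the 'while "--" in token: token = token.replace("--","-")' loop; the fuel (token's length)
-- only makes the loop total: each replace shortens the string, so the fuel never runs out
def collapseA : Nat → List Char → List Char
  | 0, t => t
  | fuel+1, t =>
      if PySem.Chars.isIn ['-', '-'] t then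
        collapseA fuel (PySem.Chars.replace t ['-', '-'] ['-'])
      else t

def sanitize_collection_token_py (value : Option String) (fallback : String) (max_length : Int) : String :=
  let raw := PySem.Chars.lower (PySem.Chars.strip ((value.getD "").toList))
  let token := PySem.Chars.stripChars (raw.map (fun ch => if PySem.Chars.isalnum ch then ch else '-')) ['-']
  let token := collapseA token.length token
  let token := PySem.Chars.stripChars (PySem.List.slice token none (some max_length)) ['-']
  if token.isEmpty then fallback else String.ofList token

-- ===== PORT B =====
-- the for-loop over raw: cur = current alnum run, ws = completed words (in order)
def wordsB : List Char → List Char → List (List Char) → List (List Char)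
  | [], cur, ws => if cur.isEmpty then ws else ws ++ [cur]
  | c :: t, cur, ws =>
      if PySem.Chars.isalnum c then wordsB t (cur ++ [c]) ws
      else if cur.isEmpty then wordsB t cur ws
      else wordsB t [] (ws ++ [cur])

def sanitize_collection_token_py_alt (value : Option String) (fallback : String) (max_length : Int) : String :=
  let raw := PySem.Chars.lower (PySem.Chars.strip ((value.getD "").toList))
  let token := PySem.Chars.join ['-'] (wordsB raw [] [])
  let token := PySem.Chars.stripChars (PySem.List.slice token none (some max_length)) ['-']
  if token.isEmpty then fallback else String.ofList token

-- ===== PRECONDITION & SPEC =====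
def Spec_sanitize_collection_token_py (value : Option String) (fallback : String) (max_length : Int) (out : String) : Prop := out = sanitize_collection_token_py_alt value fallback max_length
instance (value : Option String) (fallback : String) (max_length : Int) (out : String) : Decidable (Spec_sanitize_collection_token_py value fallback max_length out) := by unfold Spec_sanitize_collection_token_py; infer_instance

-- ===== CLAIM (what is proved, stated in full; the proofs are below) =====
def Claim_equal_sanitize_collection_token_py : Prop := ∀ (value : Option String) (fallback : String) (max_length : Int), Dom_sanitize_collection_token_py value fallback max_length → Spec_sanitize_collection_token_py value fallback max_length (sanitize_collection_token_py value fallback max_length)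

-- ===== LEMMAS AND PROOFS =====

-- pure description of one pass of token.replace("--","-")
def rep : List Char → List Char
  | [] => []
  | [c] => [c]
  | c :: d :: t => if c = '-' ∧ d = '-' then '-' :: rep t else c :: rep (d :: t)

-- maximal runs of non-dash characters
def chunks : List Char → List (List Char)
  | [] => []
  | c :: t =>
      if c = '-' then chunks t
      else (c :: t.takeWhile (· ≠ '-')) :: chunks (t.dropWhile (· ≠ '-'))
termination_by t => t.length
decreasing_by
  · simp
  · have := List.length_dropWhile_le (p := fun x => decide (x ≠ '-')) (l := t)
    simp at this ⊢; omega

theorem rep_cons_ne (c : Char) (t : List Char) (hc : c ≠ '-') : rep (c :: t) = c :: rep t := by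
  cases t with
  | nil => rfl
  | cons d t' => simp [rep, hc]

theorem chunks_cons_dash (t : List Char) : chunks ('-' :: t) = chunks t := by
  rw [chunks]; simp

theorem chunks_cons_ne (c : Char) (t : List Char) (hc : c ≠ '-') :
    chunks (c :: t) = (c :: t.takeWhile (· ≠ '-')) :: chunks (t.dropWhile (· ≠ '-')) := by
  rw [chunks]; simp [hc]

theorem infix_cons_of_infix {l t : List Char} (c : Char) (h : l <:+: t) : l <:+: c :: t :=
  h.trans ⟨[c], [], by simp⟩

theorem chunks_nil : chunks [] = [] := by rw [chunks]

theorem join_cons_ne (a : List Char) (l : List (List Char)) (hl : l ≠ []) :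
    PySem.Chars.join ['-'] (a :: l) = a ++ '-' :: PySem.Chars.join ['-'] l := by
  cases l with
  | nil => exact absurd rfl hl
  | cons b l' => simp [PySem.Chars.join, List.intercalate, List.intersperse]

theorem go_eq_rep (fuel : Nat) (l acc : List Char) (h : l.length ≤ fuel) :
    PySem.Chars.replace.go ['-', '-'] ['-'] fuel l acc = acc.reverse ++ rep l := by
  induction fuel generalizing l acc with
  | zero =>
    have : l = [] := by cases l <;> simp_all
    subst this
    rw [PySem.Chars.replace.go]; simp [rep]
  | succ n ih =>
    cases l with
    | nil =>
      rw [PySem.Chars.replace.go]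
      simp [rep]
      omega
    | cons c t =>
      rw [PySem.Chars.replace.go]
      by_cases hp : (['-', '-'] : List Char).isPrefixOf (c :: t) = true
      · cases t with
        | nil => simp [List.isPrefixOf] at hp
        | cons d t' =>
          have hc : c = '-' := by
            by_contra hc; simp [List.isPrefixOf, Ne.symm hc] at hp
          have hd : d = '-' := by
            by_contra hd; simp [List.isPrefixOf, Ne.symm hd] at hp
          subst hc; subst hd
          rw [if_pos hp]
          have hdrop : List.drop (['-', '-'] : List Char).length ('-' :: '-' :: t') = t' := rfl
          rw [hdrop, ih _ _ (by simp at h ⊢; omega)]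
          simp [rep]
      · rw [if_neg hp]
        rw [ih _ _ (by simp at h ⊢; omega)]
        have hrep : rep (c :: t) = c :: rep t := by
          cases t with
          | nil => rfl
          | cons d t' =>
            have : ¬(c = '-' ∧ d = '-') := by
              intro ⟨h1, h2⟩; subst h1; subst h2; simp [List.isPrefixOf] at hp
            simp [rep, this]
        rw [hrep]; simp

theorem replace_eq_rep (t : List Char) :
    PySem.Chars.replace t ['-', '-'] ['-'] = rep t := by
  rw [PySem.Chars.replace]
  simp only [List.isEmpty_cons, Bool.false_eq_true, if_false]
  simpa using go_eq_rep t.length t [] le_rfl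

theorem rep_length_le (t : List Char) : (rep t).length ≤ t.length := by
  fun_induction rep t <;> simp_all <;> omega

theorem rep_length_lt (t : List Char) (h : ['-', '-'] <:+: t) : (rep t).length < t.length := by
  fun_induction rep t with
  | case1 => simp at h
  | case2 c =>
    have := h.length_le; simp at this
  | case3 c d t' hcd ih =>
    have := rep_length_le t'
    simp; omega
  | case4 c d t' hcd ih =>
    have ht : ['-', '-'] <:+: d :: t' := by
      rcases List.infix_cons_iff.mp h with hpre | hinf
      · rw [List.cons_prefix_cons] at hpre
        obtain ⟨rfl, hpre⟩ := hpre
        rw [List.cons_prefix_cons] at hpre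
        exact absurd ⟨rfl, hpre.1.symm⟩ hcd
      · exact hinf
    have := ih ht
    simp at this ⊢; omega

theorem rep_ne_nil (t : List Char) (h : t ≠ []) : rep t ≠ [] := by
  fun_induction rep t <;> simp_all

theorem head?_rep (t : List Char) : (rep t).head? = t.head? := by
  fun_induction rep t with
  | case1 => rfl
  | case2 => rfl
  | case3 c d t' hcd ih => simp [hcd.1]
  | case4 => simp

theorem getLast?_cons_ne_nil {α : Type} (a : α) (l : List α) (h : l ≠ []) :
    (a :: l).getLast? = l.getLast? := by
  cases l with
  | nil => simp at h
  | cons b l' => exact List.getLast?_cons_cons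

theorem getLast?_rep (t : List Char) : (rep t).getLast? = t.getLast? := by
  fun_induction rep t with
  | case1 => rfl
  | case2 => rfl
  | case3 c d t' hcd ih =>
    obtain ⟨rfl, rfl⟩ := hcd
    cases t' with
    | nil => rfl
    | cons e t'' =>
      rw [getLast?_cons_ne_nil _ _ (rep_ne_nil _ (by simp)), ih,
        List.getLast?_cons_cons, List.getLast?_cons_cons]
  | case4 c d t' hcd ih =>
    rw [getLast?_cons_ne_nil _ _ (rep_ne_nil _ (by simp)), ih, List.getLast?_cons_cons]

theorem takeWhile_rep (t : List Char) :
    (rep t).takeWhile (· ≠ '-') = t.takeWhile (· ≠ '-') := by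
  fun_induction rep t with
  | case1 => rfl
  | case2 => rfl
  | case3 c d t' hcd ih => obtain ⟨rfl, rfl⟩ := hcd; simp
  | case4 c d t' hcd ih =>
    simp only [List.takeWhile_cons, ih]

theorem dropWhile_rep (t : List Char) :
    (rep t).dropWhile (· ≠ '-') = rep (t.dropWhile (· ≠ '-')) := by
  fun_induction rep t with
  | case1 => rfl
  | case2 c =>
    by_cases hc : c = '-' <;> simp [List.dropWhile_cons, hc, rep]
  | case3 c d t' hcd ih =>
    obtain ⟨rfl, rfl⟩ := hcd
    simp [List.dropWhile_cons, rep]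
  | case4 c d t' hcd ih =>
    by_cases hc : c = '-'
    · subst hc
      have hd : d ≠ '-' := fun hd => hcd ⟨rfl, hd⟩
      have h1 : rep ('-' :: d :: t') = '-' :: rep (d :: t') := by
        simp [rep, hd]
      simp [List.dropWhile_cons, h1]
    · simp only [List.dropWhile_cons]
      have hpc : (decide (c ≠ '-')) = true := by simp [hc]
      simp only [hpc, if_true, ih]
      by_cases hd : d = '-' <;> simp [List.dropWhile_cons, hd]

theorem chunks_rep_aux (n : Nat) : ∀ t : List Char, t.length ≤ n → chunks (rep t) = chunks t := by
  induction n with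
  | zero =>
    intro t ht
    have : t = [] := by cases t <;> simp_all
    subst this; rfl
  | succ n ih =>
    intro t ht
    cases t with
    | nil => rfl
    | cons c t' =>
      by_cases hc : c = '-'
      · subst hc
        cases t' with
        | nil => rfl
        | cons d t'' =>
          by_cases hd : d = '-'
          · subst hd
            have : rep ('-' :: '-' :: t'') = '-' :: rep t'' := by simp [rep]
            rw [this, chunks_cons_dash, chunks_cons_dash, chunks_cons_dash,
              ih t'' (by simp at ht; omega)]
          · have : rep ('-' :: d :: t'') = '-' :: rep (d :: t'') := by
              simp [rep, hd]
            rw [this, chunks_cons_dash, chunks_cons_dash, ih (d :: t'') (by simp at ht ⊢; omega)]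
      · rw [rep_cons_ne c t' hc, chunks_cons_ne c _ hc, chunks_cons_ne c _ hc,
          takeWhile_rep, dropWhile_rep,
          ih (t'.dropWhile (· ≠ '-'))
            (by have := List.length_dropWhile_le (p := fun x => decide (x ≠ '-')) (l := t')
                simp at ht this ⊢; omega)]

theorem chunks_rep (t : List Char) : chunks (rep t) = chunks t :=
  chunks_rep_aux t.length t le_rfl

theorem dropWhile_head_cases (l : List Char) :
    l.dropWhile (· ≠ '-') = [] ∨ ∃ w, l.dropWhile (· ≠ '-') = '-' :: w := by
  induction l with
  | nil => exact Or.inl rfl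
  | cons c t ih =>
    by_cases hc : c = '-'
    · subst hc; exact Or.inr ⟨t, by simp⟩
    · simpa [List.dropWhile_cons, hc] using ih

theorem chunks_ne_nil (c : Char) (t : List Char) (hc : c ≠ '-') : chunks (c :: t) ≠ [] := by
  rw [chunks_cons_ne c t hc]; simp

theorem join_chunks_aux (n : Nat) : ∀ t : List Char, t.length ≤ n → ¬ ['-', '-'] <:+: t →
    t.head? ≠ some '-' → t.getLast? ≠ some '-' →
    PySem.Chars.join ['-'] (chunks t) = t := by
  induction n with
  | zero =>
    intro t ht _ _ _
    have : t = [] := by cases t <;> simp_all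
    subst this
    simp [chunks_nil, PySem.Chars.join, List.intercalate]
  | succ n ih =>
    intro t ht hin hl hr
    cases t with
    | nil => simp [chunks_nil, PySem.Chars.join, List.intercalate]
    | cons c t' =>
      have hc : c ≠ '-' := by simpa using hl
      rw [chunks_cons_ne c t' hc]
      rcases dropWhile_head_cases t' with hv | ⟨w, hv⟩
      · -- no dash in t'
        have ht' : t'.takeWhile (· ≠ '-') = t' := by
          have := List.takeWhile_append_dropWhile (p := fun x => decide (x ≠ '-')) (l := t')
          rw [hv] at this; simpa using this
        rw [hv, ht', chunks_nil]
        simp [PySem.Chars.join, List.intercalate]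
      · -- t' = u ++ '-' :: w
        set u : List Char := t'.takeWhile (· ≠ '-') with hu
        have hsplit : u ++ '-' :: w = t' := by
          have := List.takeWhile_append_dropWhile (p := fun x => decide (x ≠ '-')) (l := t')
          rw [hv] at this; exact this
        have hw_ne : w ≠ [] := by
          intro hwnil
          subst hwnil
          apply hr
          rw [← hsplit, show c :: (u ++ ['-']) = (c :: u) ++ ['-'] from rfl,
            List.getLast?_append]
          rfl
        have hw_head : w.head? ≠ some '-' := by
          intro hwh
          apply hin
          cases w with
          | nil => simp at hwh
          | cons x w' =>
            simp at hwh
            subst hwh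
            refine infix_cons_of_infix c ?_
            rw [← hsplit]
            exact ⟨u, w', by simp⟩
        have hw_in : ¬ ['-', '-'] <:+: w := by
          intro hinf
          apply hin
          refine infix_cons_of_infix c ?_
          rw [← hsplit]
          obtain ⟨s1, s2, rfl⟩ := hinf
          exact ⟨u ++ '-' :: s1, s2, by simp⟩
        have hw_last : w.getLast? = (c :: t').getLast? := by
          rw [← hsplit, show c :: (u ++ '-' :: w) = (c :: u) ++ ('-' :: w) from rfl,
            List.getLast?_append, getLast?_cons_ne_nil '-' w hw_ne]
          cases hgw : w.getLast? with
          | none => exact absurd (List.getLast?_eq_none_iff.mp hgw) hw_ne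
          | some x => rfl
        have hw_len : w.length ≤ n := by
          have hlen : u.length + ('-' :: w).length = t'.length := by
            rw [← List.length_append, hsplit]
          simp at ht hlen ⊢; omega
        have IH := ih w hw_len hw_in hw_head (hw_last ▸ hr)
        rw [hv, chunks_cons_dash]
        have hcw : chunks w ≠ [] := by
          cases w with
          | nil => exact absurd rfl hw_ne
          | cons x w' => exact chunks_ne_nil x w' (by simpa using hw_head)
        rw [join_cons_ne _ _ hcw, IH, ← hsplit]
        simp

theorem join_chunks (t : List Char) (hin : ¬ ['-', '-'] <:+: t)
    (hl : t.head? ≠ some '-') (hr : t.getLast? ≠ some '-') :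
    PySem.Chars.join ['-'] (chunks t) = t :=
  join_chunks_aux t.length t le_rfl hin hl hr

theorem collapseA_eq_join (fuel : Nat) (t : List Char) (h : t.length ≤ fuel)
    (hl : t.head? ≠ some '-') (hr : t.getLast? ≠ some '-') :
    collapseA fuel t = PySem.Chars.join ['-'] (chunks t) := by
  induction fuel generalizing t with
  | zero =>
    have : t = [] := by cases t <;> simp_all
    subst this
    simp [collapseA, chunks_nil, PySem.Chars.join, List.intercalate]
  | succ n ih =>
    rw [collapseA]
    by_cases hin : PySem.Chars.isIn ['-', '-'] t = true
    · rw [if_pos hin, replace_eq_rep]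
      have hinf : ['-', '-'] <:+: t := (PySem.Chars.isIn_iff_infix _ _).mp hin
      rw [ih (rep t) (by have := rep_length_lt t hinf; omega)
        (by rw [head?_rep]; exact hl) (by rw [getLast?_rep]; exact hr), chunks_rep]
    · rw [if_neg hin]
      exact (join_chunks t ((PySem.Chars.isIn_eq_false_iff _ _).mp (by simpa using hin)) hl hr).symm

-- ===== strip lemmas =====

theorem head?_dropWhile_dash (l : List Char) :
    (l.dropWhile (fun c => decide (c = '-'))).head? ≠ some '-' := by
  induction l with
  | nil => simp
  | cons c t ih =>
    by_cases hc : c = '-'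
    · subst hc; simpa using ih
    · simp [List.dropWhile_cons, hc]

theorem stripChars_eq (m : List Char) :
    PySem.Chars.stripChars m ['-'] =
      ((m.dropWhile (fun c => decide (c = '-'))).reverse.dropWhile
        (fun c => decide (c = '-'))).reverse := by
  simp [PySem.Chars.stripChars]

theorem getLast?_strip (m : List Char) :
    (PySem.Chars.stripChars m ['-']).getLast? ≠ some '-' := by
  rw [stripChars_eq, List.getLast?_reverse]
  exact head?_dropWhile_dash _

theorem getLast?_dropWhile_ne_nil (p : Char → Bool) (l : List Char)
    (h : l.dropWhile p ≠ []) : (l.dropWhile p).getLast? = l.getLast? := by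
  obtain ⟨pre, hpre⟩ := List.dropWhile_suffix (l := l) p
  conv_rhs => rw [← hpre]
  rw [List.getLast?_append]
  cases hdw : l.dropWhile p with
  | nil => simp_all
  | cons x w => simp [List.getLast?_cons]

theorem head?_strip (m : List Char) :
    (PySem.Chars.stripChars m ['-']).head? ≠ some '-' := by
  rw [stripChars_eq, List.head?_reverse]
  by_cases hnil : (m.dropWhile (fun c => decide (c = '-'))).reverse.dropWhile
      (fun c => decide (c = '-')) = []
  · simp [hnil]
  · rw [getLast?_dropWhile_ne_nil _ _ hnil, List.getLast?_reverse]
    exact head?_dropWhile_dash _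

-- chunks ignores leading dashes
theorem chunks_dropWhile_contains (m : List Char) :
    chunks (m.dropWhile (fun c => decide (c = '-'))) = chunks m := by
  induction m with
  | nil => rfl
  | cons c t ih =>
    by_cases hc : c = '-'
    · subst hc
      rw [List.dropWhile_cons]
      simpa [chunks_cons_dash] using ih
    · rw [List.dropWhile_cons]
      simp [hc]

theorem chunks_all_dash (v : List Char) (hv : ∀ c ∈ v, c = '-') : chunks v = [] := by
  induction v with
  | nil => exact chunks_nil
  | cons c t ih =>
    have hc : c = '-' := hv c (by simp)
    subst hc
    rw [chunks_cons_dash]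
    exact ih (fun c hc => hv c (by simp [hc]))

theorem takeWhile_append_dash (w v : List Char) (hv : ∀ c ∈ v, c = '-') :
    (w ++ v).takeWhile (· ≠ '-') = w.takeWhile (· ≠ '-') := by
  induction w with
  | nil =>
    cases v with
    | nil => rfl
    | cons x v' => simp [List.takeWhile_cons, hv x (by simp)]
  | cons a w' ih =>
    by_cases ha : a = '-'
    · subst ha; simp [List.takeWhile_cons]
    · have hpa : (decide (a ≠ '-')) = true := by simp [ha]
      rw [List.cons_append, List.takeWhile_cons, if_pos hpa, ih, List.takeWhile_cons, if_pos hpa]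

theorem dropWhile_append_cases (w v : List Char) :
    (w ++ v).dropWhile (· ≠ '-') =
      if w.dropWhile (· ≠ '-') = [] then v.dropWhile (· ≠ '-')
      else w.dropWhile (· ≠ '-') ++ v := by
  induction w with
  | nil => simp
  | cons a w' ih =>
    by_cases ha : a = '-'
    · subst ha; simp [List.dropWhile_cons]
    · have hpa : (decide (a ≠ '-')) = true := by simp [ha]
      rw [List.cons_append, List.dropWhile_cons, if_pos hpa, ih,
        List.dropWhile_cons, if_pos hpa]

theorem chunks_append_dash_aux (n : Nat) : ∀ w v : List Char, w.length ≤ n →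
    (∀ c ∈ v, c = '-') → chunks (w ++ v) = chunks w := by
  induction n with
  | zero =>
    intro w v hw hv
    have : w = [] := by cases w <;> simp_all
    subst this
    rw [List.nil_append, chunks_nil]
    exact chunks_all_dash v hv
  | succ n ih =>
    intro w v hw hv
    cases w with
    | nil =>
      rw [List.nil_append, chunks_nil]
      exact chunks_all_dash v hv
    | cons c w' =>
      by_cases hc : c = '-'
      · subst hc
        rw [List.cons_append, chunks_cons_dash, chunks_cons_dash]
        exact ih w' v (by simp at hw; omega) hv
      · rw [List.cons_append, chunks_cons_ne c _ hc, chunks_cons_ne c _ hc,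
          takeWhile_append_dash w' v hv, dropWhile_append_cases]
        by_cases hnil : w'.dropWhile (· ≠ '-') = []
        · rw [if_pos hnil, hnil]
          have : v.dropWhile (· ≠ '-') = v := by
            cases v with
            | nil => rfl
            | cons x v' => simp [List.dropWhile_cons, hv x (by simp)]
          rw [this]
          simp [chunks_all_dash v hv, chunks]
        · rw [if_neg hnil]
          congr 1
          exact ih (w'.dropWhile (· ≠ '-')) v
            (by have := List.length_dropWhile_le (p := fun x => decide (x ≠ '-')) (l := w')
                simp at hw this ⊢; omega) hv

theorem chunks_append_dash (w v : List Char) (hv : ∀ c ∈ v, c = '-') :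
    chunks (w ++ v) = chunks w :=
  chunks_append_dash_aux w.length w v le_rfl hv

theorem chunks_strip (m : List Char) :
    chunks (PySem.Chars.stripChars m ['-']) = chunks m := by
  rw [stripChars_eq]
  have hdash : ∀ c ∈ ((m.dropWhile (fun c => decide (c = '-'))).reverse.takeWhile
      (fun c => decide (c = '-'))).reverse, c = '-' := by
    intro c hc
    rw [List.mem_reverse] at hc
    simpa using List.mem_takeWhile_imp hc
  have hdecomp : m.dropWhile (fun c => decide (c = '-')) =
      ((m.dropWhile (fun c => decide (c = '-'))).reverse.dropWhile (fun c => decide (c = '-'))).reverse ++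
      ((m.dropWhile (fun c => decide (c = '-'))).reverse.takeWhile (fun c => decide (c = '-'))).reverse := by
    conv_lhs => rw [← List.reverse_reverse (m.dropWhile (fun c => decide (c = '-'))),
      ← List.takeWhile_append_dropWhile (p := fun c => decide (c = '-'))
          (l := (m.dropWhile (fun c => decide (c = '-'))).reverse)]
    rw [List.reverse_append]
  calc chunks ((m.dropWhile (fun c => decide (c = '-'))).reverse.dropWhile
          (fun c => decide (c = '-'))).reverse
      = chunks (((m.dropWhile (fun c => decide (c = '-'))).reverse.dropWhile
            (fun c => decide (c = '-'))).reverse ++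
          ((m.dropWhile (fun c => decide (c = '-'))).reverse.takeWhile
            (fun c => decide (c = '-'))).reverse) := (chunks_append_dash _ _ hdash).symm
    _ = chunks (m.dropWhile (fun c => decide (c = '-'))) := by rw [← hdecomp]
    _ = chunks m := chunks_dropWhile_contains m

-- ===== B side =====

def glue (cur m : List Char) : List (List Char) :=
  if cur.isEmpty then chunks m
  else (cur ++ m.takeWhile (· ≠ '-')) :: chunks (m.dropWhile (· ≠ '-'))

theorem isalnum_ne_dash (c : Char) (h : PySem.Chars.isalnum c = true) : c ≠ '-' := by
  intro hc; subst hc; simp [PySem.Chars.isalnum, PySem.Chars.isalpha, PySem.Chars.isdigit,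
    PySem.Chars.isupper, PySem.Chars.islower] at h

theorem wordsB_glue (raw : List Char) : ∀ cur ws,
    wordsB raw cur ws = ws ++ glue cur (raw.map (fun ch => if PySem.Chars.isalnum ch then ch else '-')) := by
  induction raw with
  | nil =>
    intro cur ws
    by_cases hc : cur.isEmpty <;> simp [wordsB, glue, hc, chunks]
  | cons c t ih =>
    intro cur ws
    by_cases ha : PySem.Chars.isalnum c = true
    · have hcd : c ≠ '-' := isalnum_ne_dash c ha
      rw [wordsB, if_pos ha, ih]
      simp only [List.map_cons, ha, if_true]
      by_cases hc : cur.isEmpty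
      · have : cur = [] := by simpa [List.isEmpty_iff] using hc
        subst this
        simp [glue, List.takeWhile_cons, List.dropWhile_cons, hcd, chunks_cons_ne c _ hcd]
      · have hne : ¬(cur ++ [c]).isEmpty := by simp
        simp [glue, hc, hne, List.takeWhile_cons, List.dropWhile_cons, hcd]
    · rw [wordsB, if_neg ha]
      simp only [List.map_cons, ha, if_false]
      by_cases hc : cur.isEmpty
      · rw [if_pos hc, ih]
        have : cur = [] := by simpa [List.isEmpty_iff] using hc
        subst this
        simp [glue, chunks_cons_dash]
      · rw [if_neg hc, ih]
        simp [glue, hc, List.takeWhile_cons, List.dropWhile_cons, chunks_cons_dash]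

theorem wordsB_eq_chunks (raw : List Char) :
    wordsB raw [] [] = chunks (raw.map (fun ch => if PySem.Chars.isalnum ch then ch else '-')) := by
  rw [wordsB_glue raw [] []]
  simp [glue]

-- ===== VERDICT (by name: the statement is the Claim_ definition above) =====
theorem sanitize_collection_token_py_spec : Claim_equal_sanitize_collection_token_py := by
  intro value fallback max_length _
  unfold Spec_sanitize_collection_token_py sanitize_collection_token_py sanitize_collection_token_py_alt
  have key : ∀ raw : List Char,
      collapseA (PySem.Chars.stripChars (raw.map (fun ch => if PySem.Chars.isalnum ch then ch else '-')) ['-']).length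
        (PySem.Chars.stripChars (raw.map (fun ch => if PySem.Chars.isalnum ch then ch else '-')) ['-'])
      = PySem.Chars.join ['-'] (wordsB raw [] []) := by
    intro raw
    rw [wordsB_eq_chunks, collapseA_eq_join _ _ le_rfl (head?_strip _) (getLast?_strip _), chunks_strip]
  simp only [key]
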